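-- pv_equiv track=rewrite | github.com/bonashen/pdf-reader-mcp-server | src/academic_pdf_reader_mcp/academic/citation_parser.py | _extract_reference_years
-- ===== SOURCE A (Python) =====
-- from typing import List, Dict, Any, Optional
--
-- def _extract_reference_years(references: List[Dict[str, Any]]) -> Dict[str, Any]:
--     """Extract publication years from references"""
--     years = []
--     for ref in references:
--         if ref["year"]:
--             try:
--                 year = int(ref["year"][:4])  # Remove letter suffixes
--                 years.append(year)
--             except ValueError:
--                 continue
--
--     if not years:
--         return {"min_year": None, "max_year": None, "year_range": 0}
--
--     return {
--         "min_year": min(years),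
--         "max_year": max(years),
--         "year_range": max(years) - min(years),
--         "recent_references": sum(1 for y in years if y >= 2015)
--     }
-- ===== SOURCE B (Python) =====
-- from typing import List, Dict, Any, Optional
--
-- def _year_of(ref: Dict[str, Any]) -> Optional[int]:
--     value = ref["year"]
--     if not value:
--         return None
--     try:
--         return int(value[:4])  # Remove letter suffixes
--     except ValueError:
--         return None
--
-- def _extract_reference_years(references: List[Dict[str, Any]]) -> Dict[str, Any]:
--     """Extract publication years from references (single pass, running accumulators)"""
--     min_year: Optional[int] = None
--     max_year: Optional[int] = None
--     recent = 0
--     for ref in references: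
--         year = _year_of(ref)
--         if year is None:
--             continue
--         if min_year is None or year < min_year:
--             min_year = year
--         if max_year is None or max_year < year:
--             max_year = year
--         if year >= 2015:
--             recent += 1
--     if min_year is None:
--         return {"min_year": None, "max_year": None, "year_range": 0}
--     return {
--         "min_year": min_year,
--         "max_year": max_year,
--         "year_range": max_year - min_year,
--         "recent_references": recent,
--     }
-- ===== Notes on version B (the rewrite author's own statement) =====
-- stated objective: alternative
-- what changed: B fuses everything into one linear pass keeping running min/max/recent accumulators instead of materializing a years list and then scanning it four more times (min, max twice, sum).
import Mathlib
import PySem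

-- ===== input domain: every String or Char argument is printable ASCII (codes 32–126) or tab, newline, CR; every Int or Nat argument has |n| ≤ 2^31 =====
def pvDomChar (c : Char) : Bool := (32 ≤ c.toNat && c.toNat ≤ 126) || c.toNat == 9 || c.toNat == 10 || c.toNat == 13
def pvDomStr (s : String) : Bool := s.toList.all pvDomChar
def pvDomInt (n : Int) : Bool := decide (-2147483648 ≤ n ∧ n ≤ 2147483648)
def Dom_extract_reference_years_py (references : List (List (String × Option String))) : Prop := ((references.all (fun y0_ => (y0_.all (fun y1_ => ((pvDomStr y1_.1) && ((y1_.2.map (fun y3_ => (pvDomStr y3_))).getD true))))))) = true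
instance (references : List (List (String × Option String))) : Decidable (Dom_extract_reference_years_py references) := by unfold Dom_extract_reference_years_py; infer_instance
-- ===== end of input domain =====

-- B fuses the work into one pass with running min/max/recent accumulators; A builds a
-- years list and scans it again for min, max (twice) and the recent count.
-- Pre_ excludes only references missing the "year" key, where the Python A raises KeyError
-- (B raises there too).

-- shared loop body: both Pythons evaluate ref["year"], the truthiness guard and
-- int(value[:4]) with ValueError→skip identically (in Source B it is the helper _year_of)
def pvParseYear (ref : List (String × Option String)) : Option Int :=
  match (PySem.Dict.mk ref).get? "year" with
  | some (some s) => if s = "" then none else PySem.Int.ofStr? (PySem.Str.slice s none (some 4))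
  | _ => none

-- ===== PORT A =====
def extract_reference_years_py (references : List (List (String × Option String))) : List (String × Option Int) :=
  let years := references.foldl (fun ys ref =>
    match pvParseYear ref with
    | some y => ys ++ [y]
    | none => ys) []
  match years with
  | [] => [("min_year", none), ("max_year", none), ("year_range", some 0)]
  | _ :: _ =>
    let mn := (PySem.List.min? years (fun y => y)).getD 0
    let mx := (PySem.List.max? years (fun y => y)).getD 0
    [("min_year", some mn), ("max_year", some mx),
     ("year_range", some (mx - mn)),
     ("recent_references", some (years.foldl (fun a y => if y ≥ 2015 then a + 1 else a) 0))]

-- ===== PORT B =====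
def pvStepB (acc : Option Int × Option Int × Int) (y : Int) : Option Int × Option Int × Int :=
  (match acc.1 with | none => some y | some m => if y < m then some y else some m,
   match acc.2.1 with | none => some y | some m => if m < y then some y else some m,
   if y ≥ 2015 then acc.2.2 + 1 else acc.2.2)

def extract_reference_years_py_alt (references : List (List (String × Option String))) : List (String × Option Int) :=
  let st := references.foldl (fun acc ref =>
    match pvParseYear ref with
    | none => acc
    | some y => pvStepB acc y) ((none : Option Int), (none : Option Int), (0 : Int))
  match st with
  | (some mn, some mx, r) =>
    [("min_year", some mn), ("max_year", some mx),
     ("year_range", some (mx - mn)), ("recent_references", some r)]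
  | _ => [("min_year", none), ("max_year", none), ("year_range", some 0)]

-- ===== PRECONDITION & SPEC =====
-- Pre_ admits exactly the inputs where every reference carries the "year" key;
-- on any other input the Python A raises KeyError (and so does B).
def Pre_extract_reference_years_py (references : List (List (String × Option String))) : Prop :=
  (references.all (fun ref => (PySem.Dict.mk ref).contains "year")) = true
instance (references : List (List (String × Option String))) : Decidable (Pre_extract_reference_years_py references) := by unfold Pre_extract_reference_years_py; infer_instance

def pvWitness_extract_reference_years_py : (List (List (String × Option String))) :=
  [[("year", some "2020a")], [("year", none)], [("year", some "1999")]]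

def Spec_extract_reference_years_py (references : List (List (String × Option String))) (out : List (String × Option Int)) : Prop := out = extract_reference_years_py_alt references
instance (references : List (List (String × Option String))) (out : List (String × Option Int)) : Decidable (Spec_extract_reference_years_py references out) := by unfold Spec_extract_reference_years_py; infer_instance

-- ===== CLAIM (what is proved, stated in full; the proofs are below) =====
def Claim_equal_extract_reference_years_py : Prop := ∀ (references : List (List (String × Option String))), Dom_extract_reference_years_py references → Pre_extract_reference_years_py references → Spec_extract_reference_years_py references (extract_reference_years_py references)

-- ===== LEMMAS AND PROOFS =====

-- A's loop materializes exactly the filterMap of pvParseYear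
theorem foldA_eq (refs : List (List (String × Option String))) (ys : List Int) :
    refs.foldl (fun ys ref =>
      match pvParseYear ref with
      | some y => ys ++ [y]
      | none => ys) ys = ys ++ refs.filterMap pvParseYear := by
  induction refs generalizing ys with
  | nil => simp
  | cons r t ih =>
    cases h : pvParseYear r <;> simp [List.foldl_cons, h, ih]

-- B's loop over references is the accumulator loop over that same filterMap
theorem foldB_eq (refs : List (List (String × Option String))) (acc : Option Int × Option Int × Int) :
    refs.foldl (fun acc ref =>
      match pvParseYear ref with
      | none => acc
      | some y => pvStepB acc y) acc = (refs.filterMap pvParseYear).foldl pvStepB acc := by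
  induction refs generalizing acc with
  | nil => simp
  | cons r t ih =>
    cases h : pvParseYear r <;> simp [List.foldl_cons, h, ih]

-- the accumulator loop computes running min / max / recent count
theorem stepB_run (t : List Int) (mn mx r : Int) :
    t.foldl pvStepB (some mn, some mx, r) =
      (some (t.foldl min mn), some (t.foldl max mx),
       t.foldl (fun a y => if y ≥ 2015 then a + 1 else a) r) := by
  induction t generalizing mn mx r with
  | nil => simp
  | cons y t ih =>
    have e1 : (if y < mn then some y else some mn) = some (min mn y) := by
      rw [min_def]; split_ifs <;> (first | rfl | (exact congrArg some (by omega)) | omega)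
    have e2 : (if mx < y then some y else some mx) = some (max mx y) := by
      rw [max_def]; split_ifs <;> (first | rfl | (exact congrArg some (by omega)) | omega)
    rw [List.foldl_cons, show pvStepB (some mn, some mx, r) y =
        (some (min mn y), some (max mx y), if y ≥ 2015 then r + 1 else r) by
      simp only [pvStepB]; rw [e1, e2]]
    rw [ih]
    simp [List.foldl_cons]

-- ===== VERDICT (by name: the statement is the Claim_ definition above) =====
theorem extract_reference_years_py_spec : Claim_equal_extract_reference_years_py := by
  intro refs _ _
  unfold Spec_extract_reference_years_py extract_reference_years_py extract_reference_years_py_alt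
  rw [foldA_eq, foldB_eq]
  simp only [List.nil_append]
  cases h : refs.filterMap pvParseYear with
  | nil => simp
  | cons y t =>
    simp only [List.foldl_cons, pvStepB]
    rw [stepB_run]
    simp [PySem.List.min?_id_cons, PySem.List.max?_id_cons]
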